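-- pv_equiv track=rewrite | github.com/seldonPlan/advent_of_code | 06/a/solution.py | process_day
-- ===== SOURCE A (Python) =====
-- from typing import List
--
-- def process_day(day: List[int]):
--     _d: List[int] = [i for i in day]
--     _n: List[int] = []
--     for idx, age in enumerate(_d):
--         if age > 0:
--             _d[idx] = age - 1
--         else:
--             _d[idx] = 6
--             _n.append(8)
--     _d.extend(_n)
--
--     return _d
-- ===== SOURCE B (Python) =====
-- def process_day(day):
--     # right fold: result for day = head's new timer prepended to the result for
--     # the tail, with this fish's spawn (an 8) appended at the very end.
--     out = []
--     for t in reversed(day):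
--         if t > 0:
--             out = [t - 1] + out
--         else:
--             out = [6] + out + [8]
--     return out
-- ===== Notes on version B (the rewrite author's own statement) =====
-- stated objective: alternative
-- what changed: A walks the list forward mutating a copy by index and collecting one 8 per spawner in a side list extended at the end; B is a right fold that builds the whole result from the tail up, prepending each transformed timer and appending that fish's spawned 8 directly to the accumulated result (no index mutation, no side list, no final extend).
import Mathlib
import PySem

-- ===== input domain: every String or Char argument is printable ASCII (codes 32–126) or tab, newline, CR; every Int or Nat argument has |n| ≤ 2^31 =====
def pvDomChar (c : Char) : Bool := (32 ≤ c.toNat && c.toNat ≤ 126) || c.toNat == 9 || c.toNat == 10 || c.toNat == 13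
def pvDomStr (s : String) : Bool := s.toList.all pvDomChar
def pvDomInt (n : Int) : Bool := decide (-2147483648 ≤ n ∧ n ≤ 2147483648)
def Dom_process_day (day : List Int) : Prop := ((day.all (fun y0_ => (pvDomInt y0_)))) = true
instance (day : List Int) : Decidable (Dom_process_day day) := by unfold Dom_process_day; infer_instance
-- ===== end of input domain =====

-- B replaces A's forward enumerate/index-mutate/extend pass with a right fold that
-- builds the result from the tail up, prepending each new timer and appending that
-- fish's spawned 8 to the accumulated result (objective: alternative; not faster).


-- ===== PORT A =====
-- one step of A's loop body: mutate _d at idx, maybe append 8 to _n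
def pvStepA (st : List Int × List Int) (p : Int × Int) : List Int × List Int :=
  if p.2 > 0 then (st.1.set p.1.toNat (p.2 - 1), st.2)
  else (st.1.set p.1.toNat 6, st.2 ++ [8])

def process_day (day : List Int) : List Int :=
  let d : List Int := day.map (fun i => i)          -- _d = [i for i in day]
  let st := (PySem.List.enumerate d 0).foldl pvStepA (d, ([] : List Int))
  st.1 ++ st.2                                       -- _d.extend(_n); return _d

-- ===== PORT B =====
-- Source B's loop over reversed(day) updating 'out' is exactly a right fold over day
def pvStepB (t : Int) (out : List Int) : List Int :=
  if t > 0 then [t - 1] ++ out else [6] ++ out ++ [8]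

def process_day_alt (day : List Int) : List Int :=
  day.foldr pvStepB []

-- ===== PRECONDITION & SPEC =====
def Spec_process_day (day : List Int) (out : List Int) : Prop := out = process_day_alt day
instance (day : List Int) (out : List Int) : Decidable (Spec_process_day day out) := by unfold Spec_process_day; infer_instance

-- ===== CLAIM (what is proved, stated in full; the proofs are below) =====
def Claim_equal_process_day : Prop := ∀ (day : List Int), Dom_process_day day → Spec_process_day day (process_day day)

-- ===== LEMMAS AND PROOFS =====

-- A's loop invariant: folding over the enumerated suffix transforms it in place and
-- appends one 8 per non-positive timer.
theorem pv_loop_inv (rest : List Int) : ∀ (pre n : List Int),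
    (PySem.List.enumerate rest (pre.length : Int)).foldl pvStepA (pre ++ rest, n) =
      (pre ++ rest.map (fun t => if t > 0 then t - 1 else 6),
       n ++ List.replicate (rest.filter (fun t => t ≤ 0)).length 8) := by
  induction rest with
  | nil => simp [PySem.List.enumerate]
  | cons x rest ih =>
    intro pre n
    rw [PySem.List.enumerate_cons, List.foldl_cons]
    by_cases hx : x > 0
    · have h1 : pvStepA (pre ++ x :: rest, n) ((pre.length : Int), x)
          = ((pre ++ [x - 1]) ++ rest, n) := by
        simp [pvStepA, hx]
      rw [h1]
      have h2 := ih (pre ++ [x - 1]) n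
      simp only [List.length_append, List.length_cons, List.length_nil] at h2
      have : ((pre.length : Int) + 1) = (((pre.length + (0 + 1)) : Nat) : Int) := by push_cast; ring
      rw [this, h2]
      simp [hx, not_le.mpr hx]
    · have h1 : pvStepA (pre ++ x :: rest, n) ((pre.length : Int), x)
          = ((pre ++ [6]) ++ rest, n ++ [8]) := by
        simp [pvStepA, hx]
      rw [h1]
      have h2 := ih (pre ++ [6]) (n ++ [8])
      simp only [List.length_append, List.length_cons, List.length_nil] at h2
      have : ((pre.length : Int) + 1) = (((pre.length + (0 + 1)) : Nat) : Int) := by push_cast; ring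
      rw [this, h2]
      simp [hx, le_of_not_gt hx, List.replicate_succ]

-- B's right fold produces the transformed list followed by one 8 per non-positive timer
theorem pv_foldr_char (day : List Int) :
    day.foldr pvStepB [] =
      day.map (fun t => if t > 0 then t - 1 else 6)
        ++ List.replicate (day.filter (fun t => t ≤ 0)).length 8 := by
  induction day with
  | nil => simp
  | cons x rest ih =>
    by_cases hx : x > 0
    · simp [pvStepB, hx, ih, not_le.mpr hx]
    · simp only [List.foldr_cons, pvStepB, if_neg hx, ih]
      simp [hx, le_of_not_gt hx, List.replicate_succ]
      rw [← List.replicate_succ', List.replicate_succ]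

-- ===== VERDICT (by name: the statement is the Claim_ definition above) =====
theorem process_day_spec : Claim_equal_process_day := by
  intro day _
  unfold Spec_process_day process_day process_day_alt
  have hA := pv_loop_inv day ([] : List Int) ([] : List Int)
  simp only [List.length_nil, Int.natCast_zero, List.nil_append] at hA
  simp [hA, pv_foldr_char]
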